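-- pv_equiv track=rewrite | github.com/breitreiter/dreamlands | sim/expedition_sim.py | config_dc_pass_rate
-- ===== SOURCE A (Python) =====
-- def config_dc_pass_rate(dc: int, modifier: int) -> int:
--     """Nominal d20 pass rate: P(d20 + mod >= dc), with nat1=fail, nat20=pass."""
--     passes = 0
--     for r in range(1, 21):
--         if r == 1:
--             continue  # nat 1 always fails
--         elif r == 20:
--             passes += 1  # nat 20 always passes
--         elif r + modifier >= dc:
--             passes += 1
--     return passes * 5  # out of 20 = percentage
-- ===== SOURCE B (Python) =====
-- def config_dc_pass_rate(dc: int, modifier: int) -> int: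
--     """Nominal d20 pass rate: closed form, no loop.
--
--     Rolls 2..19 pass iff r >= dc - modifier; nat20 always passes, nat1 always fails.
--     """
--     threshold = dc - modifier
--     mid = max(0, 20 - max(2, threshold))
--     return (1 + mid) * 5
-- ===== Notes on version B (the rewrite author's own statement) =====
-- stated objective: simpler
-- what changed: Replaced the 20-iteration loop with per-roll branching by a closed-form count: passes = 1 + max(0, 20 - max(2, dc - modifier)).
import Mathlib
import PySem

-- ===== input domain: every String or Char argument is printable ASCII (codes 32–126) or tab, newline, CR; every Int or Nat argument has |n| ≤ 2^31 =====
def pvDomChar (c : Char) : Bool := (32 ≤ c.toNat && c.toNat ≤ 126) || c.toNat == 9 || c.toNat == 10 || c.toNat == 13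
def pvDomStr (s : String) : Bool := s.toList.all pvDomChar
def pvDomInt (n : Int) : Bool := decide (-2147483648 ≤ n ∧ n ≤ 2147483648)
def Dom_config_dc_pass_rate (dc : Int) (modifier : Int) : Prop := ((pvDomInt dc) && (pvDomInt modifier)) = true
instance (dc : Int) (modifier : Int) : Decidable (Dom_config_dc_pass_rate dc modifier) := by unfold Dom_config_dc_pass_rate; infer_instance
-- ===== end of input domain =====

-- B replaces A's 20-iteration loop over the d20 rolls by a closed-form count (objective: simpler).

-- ===== PORT A =====
-- literal port of A's loop over range(1, 21) accumulating `passes`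
def config_dc_pass_rate (dc : Int) (modifier : Int) : Int :=
  let passes :=
    (PySem.List.pyRange 1 21 1).foldl
      (fun passes r =>
        if r == 1 then passes              -- nat 1 always fails (continue)
        else if r == 20 then passes + 1    -- nat 20 always passes
        else if r + modifier ≥ dc then passes + 1
        else passes)
      (0 : Int)
  passes * 5

-- ===== PORT B =====
def config_dc_pass_rate_alt (dc : Int) (modifier : Int) : Int :=
  let threshold := dc - modifier
  let mid := max 0 (20 - max 2 threshold)
  (1 + mid) * 5

-- ===== PRECONDITION & SPEC =====
def Spec_config_dc_pass_rate (dc : Int) (modifier : Int) (out : Int) : Prop := out = config_dc_pass_rate_alt dc modifier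
instance (dc : Int) (modifier : Int) (out : Int) : Decidable (Spec_config_dc_pass_rate dc modifier out) := by unfold Spec_config_dc_pass_rate; infer_instance

-- ===== CLAIM (what is proved, stated in full; the proofs are below) =====
def Claim_equal_config_dc_pass_rate : Prop := ∀ (dc : Int) (modifier : Int), Dom_config_dc_pass_rate dc modifier → Spec_config_dc_pass_rate dc modifier (config_dc_pass_rate dc modifier)

-- ===== LEMMAS AND PROOFS =====

-- A's loop over the remaining rolls a..20 (2 ≤ a ≤ 20) adds 1 (the nat20) plus the
-- number of rolls r with a ≤ r ≤ 19 and r + modifier ≥ dc, i.e. max 0 (20 - max a (dc - modifier)).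
theorem pv_fold_range (dc modifier : Int) (n : Nat) :
    ∀ (a acc : Int), a = 21 - (n : Int) → 2 ≤ a → a ≤ 20 →
    (PySem.List.pyRange a 21 1).foldl
      (fun passes r =>
        if r == 1 then passes
        else if r == 20 then passes + 1
        else if r + modifier ≥ dc then passes + 1
        else passes)
      acc
    = acc + 1 + max 0 (20 - max a (dc - modifier)) := by
  induction n with
  | zero => intro a acc ha h2 h20; omega
  | succ m ih =>
    intro a acc ha h2 h20
    rw [PySem.List.pyRange_one_cons (by omega : a < 21), List.foldl_cons]
    by_cases h19 : a = 20
    · subst h19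
      have hempty : PySem.List.pyRange (20 + 1) 21 1 = [] := by decide
      rw [hempty, List.foldl_nil]
      have : ((20 : Int) == 1) = false := by decide
      rw [this]
      have : ((20 : Int) == 20) = true := by decide
      simp only [this, Bool.false_eq_true, if_false, if_true]
      omega
    · have hm : a + 1 = 21 - (m : Int) := by omega
      rw [ih (a + 1) _ hm (by omega) (by omega)]
      have hne1 : (a == 1) = false := by rw [beq_eq_false_iff_ne]; omega
      have hne20 : (a == 20) = false := by rw [beq_eq_false_iff_ne]; omega
      rw [hne1, hne20]
      simp only [Bool.false_eq_true, if_false]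
      by_cases hpass : a + modifier ≥ dc
      · rw [if_pos hpass]; omega
      · rw [if_neg hpass]; omega

-- ===== VERDICT (by name: the statement is the Claim_ definition above) =====
theorem config_dc_pass_rate_spec : Claim_equal_config_dc_pass_rate := by
  intro dc modifier _
  unfold Spec_config_dc_pass_rate config_dc_pass_rate config_dc_pass_rate_alt
  rw [PySem.List.pyRange_one_cons (by omega : (1:Int) < 21), List.foldl_cons]
  have h1 : ((1 : Int) == 1) = true := by decide
  rw [h1]
  simp only [if_true]
  rw [show (1:Int) + 1 = 2 from rfl]
  rw [pv_fold_range dc modifier 19 2 0 (by omega) (by omega) (by omega)]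
  omega
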